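-- pv_equiv track=rewrite | github.com/idopinto/Wave-Editor | test_ex6/wave_editor.py | dim_filter_audio
-- ===== SOURCE A (Python) =====
-- def dim_filter_audio(audio_list):
--     """
--     7
--     """
--     dimmed_wav_list = list()
--     if len(audio_list) == 0 or len(audio_list) == 1:
--         return audio_list
--     for i in range(len(audio_list)):
--         if i == 0:
--             left_avg = int((audio_list[i][0] + audio_list[i + 1][0]) / 2)
--             right_avg = int((audio_list[i][1] + audio_list[i + 1][1]) / 2)
--         elif i == len(audio_list) - 1:
--             left_avg = int((audio_list[i - 1][0] + audio_list[i][0]) / 2)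
--             right_avg = int((audio_list[i - 1][1] + audio_list[i][1]) / 2)
--         else:
--             left_avg = int((audio_list[i - 1][0] + audio_list[i][0]
--                             + audio_list[i + 1][0]) / 3)
--             right_avg = int((audio_list[i - 1][1] + audio_list[i][1]
--                              + audio_list[i + 1][1]) / 3)
--         dimmed_wav_list.append([left_avg, right_avg])
--     return dimmed_wav_list
-- ===== SOURCE B (Python) =====
-- def dim_filter_audio(audio_list):
--     if len(audio_list) <= 1:
--         return audio_list
--
--     def dim_channel(c):
--         interior = [int((a + b + d) / 3) for a, b, d in zip(c, c[1:], c[2:])]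
--         return ([int((c[0] + c[1]) / 2)]
--                 + interior
--                 + [int((c[-2] + c[-1]) / 2)])
--
--     lefts = dim_channel([s[0] for s in audio_list])
--     rights = dim_channel([s[1] for s in audio_list])
--     return [[l, r] for l, r in zip(lefts, rights)]
-- ===== Notes on version B (the rewrite author's own statement) =====
-- stated objective: simpler
-- what changed: Replaces the single indexed loop with a three-way position branch (duplicated for left/right) by transposing into two channel lists and dimming each channel once: head/tail handled outside, interior via one zip-of-three comprehension, then zipping the channels back into pairs.
import Mathlib
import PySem

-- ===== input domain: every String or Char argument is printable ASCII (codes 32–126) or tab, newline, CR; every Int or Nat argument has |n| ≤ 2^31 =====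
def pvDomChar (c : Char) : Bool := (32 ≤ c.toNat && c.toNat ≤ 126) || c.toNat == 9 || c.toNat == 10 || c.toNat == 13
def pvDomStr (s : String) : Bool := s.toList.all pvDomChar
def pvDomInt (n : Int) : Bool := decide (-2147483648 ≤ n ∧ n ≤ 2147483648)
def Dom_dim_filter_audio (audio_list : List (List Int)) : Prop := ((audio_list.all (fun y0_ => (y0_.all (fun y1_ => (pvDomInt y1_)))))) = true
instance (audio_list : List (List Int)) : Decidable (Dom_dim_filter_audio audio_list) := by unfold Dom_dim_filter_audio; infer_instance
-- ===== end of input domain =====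

-- B restructures A's per-index three-way-branch loop into per-channel dimming (simpler decomposition);
-- same return value, no speed claim.

-- ===== PORT A =====
-- int(x/2) / int(x/3) on ints is truncating division; exact on Dom via PySem.Int.truncdiv.
-- Row lookups audio_list[i][j] use in-range nonnegative indices under Pre_, so ?.getD is exact there.
def dim_filter_audio (audio_list : List (List Int)) : List (List Int) :=
  if audio_list.length = 0 ∨ audio_list.length = 1 then audio_list
  else
    (List.range audio_list.length).foldl
      (fun dimmed i =>
        let left_avg :=
          if i = 0 then
            PySem.Int.truncdiv ((audio_list[i]?.getD [])[0]?.getD 0 + (audio_list[i + 1]?.getD [])[0]?.getD 0) 2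
          else if i = audio_list.length - 1 then
            PySem.Int.truncdiv ((audio_list[i - 1]?.getD [])[0]?.getD 0 + (audio_list[i]?.getD [])[0]?.getD 0) 2
          else
            PySem.Int.truncdiv ((audio_list[i - 1]?.getD [])[0]?.getD 0 + (audio_list[i]?.getD [])[0]?.getD 0
              + (audio_list[i + 1]?.getD [])[0]?.getD 0) 3
        let right_avg :=
          if i = 0 then
            PySem.Int.truncdiv ((audio_list[i]?.getD [])[1]?.getD 0 + (audio_list[i + 1]?.getD [])[1]?.getD 0) 2
          else if i = audio_list.length - 1 then
            PySem.Int.truncdiv ((audio_list[i - 1]?.getD [])[1]?.getD 0 + (audio_list[i]?.getD [])[1]?.getD 0) 2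
          else
            PySem.Int.truncdiv ((audio_list[i - 1]?.getD [])[1]?.getD 0 + (audio_list[i]?.getD [])[1]?.getD 0
              + (audio_list[i + 1]?.getD [])[1]?.getD 0) 3
        dimmed ++ [[left_avg, right_avg]])
      []

-- ===== PORT B =====
-- zip(ch, ch[1:], ch[2:]) ported as nested zips; ch[-2]/ch[-1] as indices length-2/length-1 (in range, 2 ≤ len).
def pvDimChannel (ch : List Int) : List Int :=
  let interior := ((ch.zip (ch.drop 1)).zip (ch.drop 2)).map
    (fun p => PySem.Int.truncdiv (p.1.1 + p.1.2 + p.2) 3)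
  [PySem.Int.truncdiv (ch[0]?.getD 0 + ch[1]?.getD 0) 2]
    ++ interior
    ++ [PySem.Int.truncdiv (ch[ch.length - 2]?.getD 0 + ch[ch.length - 1]?.getD 0) 2]

def dim_filter_audio_alt (audio_list : List (List Int)) : List (List Int) :=
  if audio_list.length ≤ 1 then audio_list
  else
    let lefts := pvDimChannel (audio_list.map (fun s => s[0]?.getD 0))
    let rights := pvDimChannel (audio_list.map (fun s => s[1]?.getD 0))
    (lefts.zip rights).map (fun p => [p.1, p.2])

-- ===== PRECONDITION & SPEC =====
-- Pre_ excludes exactly the inputs where Python A raises IndexError: 2 or more samples and some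
-- sample with fewer than 2 entries (A reads sample[0] and sample[1]); B raises there too.
def Pre_dim_filter_audio (audio_list : List (List Int)) : Prop :=
  audio_list.length ≤ 1 ∨ ∀ s ∈ audio_list, 2 ≤ s.length
instance (audio_list : List (List Int)) : Decidable (Pre_dim_filter_audio audio_list) := by
  unfold Pre_dim_filter_audio; infer_instance
def pvWitness_dim_filter_audio : List (List Int) := [[1, 2], [3, 4], [5, -7]]

def Spec_dim_filter_audio (audio_list : List (List Int)) (out : List (List Int)) : Prop := out = dim_filter_audio_alt audio_list
instance (audio_list : List (List Int)) (out : List (List Int)) : Decidable (Spec_dim_filter_audio audio_list out) := by unfold Spec_dim_filter_audio; infer_instance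

-- ===== CLAIM (what is proved, stated in full; the proofs are below) =====
def Claim_equal_dim_filter_audio : Prop := ∀ (audio_list : List (List Int)), Dom_dim_filter_audio audio_list → Pre_dim_filter_audio audio_list → Spec_dim_filter_audio audio_list (dim_filter_audio audio_list)

-- ===== LEMMAS AND PROOFS =====

theorem pvDimChannel_length (ch : List Int) (h : 2 ≤ ch.length) :
    (pvDimChannel ch).length = ch.length := by
  simp [pvDimChannel]
  omega

theorem pvDimChannel_getElem (ch : List Int) (h : 2 ≤ ch.length) (i : Nat)
    (hlen : i < (pvDimChannel ch).length) :
    (pvDimChannel ch)[i] =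
      if i = 0 then PySem.Int.truncdiv (ch[0]?.getD 0 + ch[1]?.getD 0) 2
      else if i = ch.length - 1 then
        PySem.Int.truncdiv (ch[ch.length - 2]?.getD 0 + ch[ch.length - 1]?.getD 0) 2
      else PySem.Int.truncdiv (ch[i - 1]?.getD 0 + ch[i]?.getD 0 + ch[i + 1]?.getD 0) 3 := by
  have hi : i < ch.length := by rw [← pvDimChannel_length ch h]; exact hlen
  simp only [show pvDimChannel ch = PySem.Int.truncdiv (ch[0]?.getD 0 + ch[1]?.getD 0) 2
      :: (((ch.zip (ch.drop 1)).zip (ch.drop 2)).map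
            (fun p => PySem.Int.truncdiv (p.1.1 + p.1.2 + p.2) 3)
          ++ [PySem.Int.truncdiv (ch[ch.length - 2]?.getD 0 + ch[ch.length - 1]?.getD 0) 2])
    from rfl] at hlen ⊢
  cases i with
  | zero => rfl
  | succ j =>
    simp only [List.getElem_cons_succ]
    rw [if_neg (by omega)]
    by_cases hj : j < (((ch.zip (ch.drop 1)).zip (ch.drop 2)).map
        (fun p => PySem.Int.truncdiv (p.1.1 + p.1.2 + p.2) 3)).length
    · have hjl : j + 2 < ch.length := by simp at hj; omega
      rw [List.getElem_append_left hj]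
      rw [if_neg (by omega)]
      simp [List.getElem_zip, List.getElem?_eq_getElem (show j < ch.length by omega),
        List.getElem?_eq_getElem (show j + 1 < ch.length by omega),
        List.getElem?_eq_getElem hjl]
      simp [Nat.add_comm]
    · have hjlen : (((ch.zip (ch.drop 1)).zip (ch.drop 2)).map
          (fun p => PySem.Int.truncdiv (p.1.1 + p.1.2 + p.2) 3)).length = ch.length - 2 := by
        simp; omega
      have hj2 : j = ch.length - 2 := by omega
      rw [List.getElem_append_right (Nat.le_of_not_lt hj)]
      rw [if_pos (by omega)]
      simp [hj2]

theorem pvGetDMapChan (xs : List (List Int)) (j k : Nat) :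
    ((xs.map (fun s => s[k]?.getD 0))[j]?).getD 0 = ((xs[j]?).getD [])[k]?.getD 0 := by
  rw [List.getElem?_map]
  cases xs[j]? <;> simp

theorem dim_filter_audio_eq_alt (audio_list : List (List Int)) :
    dim_filter_audio audio_list = dim_filter_audio_alt audio_list := by
  unfold dim_filter_audio dim_filter_audio_alt
  by_cases hsmall : audio_list.length ≤ 1
  · rw [if_pos (by omega), if_pos hsmall]
  · have h2 : 2 ≤ audio_list.length := by omega
    rw [if_neg (by omega), if_neg (by omega)]
    rw [PySem.List.foldl_append_singleton_eq_map]
    simp only [List.nil_append]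
    have hlL : 2 ≤ (audio_list.map (fun s : List Int => s[0]?.getD 0)).length := by simp; omega
    have hlR : 2 ≤ (audio_list.map (fun s : List Int => s[1]?.getD 0)).length := by simp; omega
    apply List.ext_getElem
    · simp [pvDimChannel_length _ hlL, pvDimChannel_length _ hlR]
    · intro i hi hi'
      have hin : i < audio_list.length := by simpa using hi
      have hiL : i < (pvDimChannel (audio_list.map (fun s : List Int => s[0]?.getD 0))).length := by
        rw [pvDimChannel_length _ hlL]; simpa using hin
      have hiR : i < (pvDimChannel (audio_list.map (fun s : List Int => s[1]?.getD 0))).length := by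
        rw [pvDimChannel_length _ hlR]; simpa using hin
      rw [List.getElem_map, List.getElem_range, List.getElem_map, List.getElem_zip]
      rw [pvDimChannel_getElem _ hlL i hiL, pvDimChannel_getElem _ hlR i hiR]
      simp only [List.length_map, pvGetDMapChan]
      split_ifs with h0 h1
      · subst h0; rfl
      · rw [show i - 1 = audio_list.length - 2 from by omega, h1]
      · rfl

-- ===== VERDICT (by name: the statement is the Claim_ definition above) =====
theorem dim_filter_audio_spec : Claim_equal_dim_filter_audio := by
  intro audio_list _ _
  unfold Spec_dim_filter_audio
  exact dim_filter_audio_eq_alt audio_list
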